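-- pv_equiv track=rewrite | github.com/GermanMT/advisory | metamodel/metamodel.py | transform
-- ===== SOURCE A (Python) =====
-- def transform(version: str) -> int:
--     ''' Si no está completa se añade un '.0.0' / '.0' al final de la version '''
--     dots = version.count('.')
--     if dots == 1:
--         version = version + '.0'
--     elif dots == 0:
--         version = version + '.0.0'
--
--     l = [int(x, 10) for x in version.split('.') if x.isnumeric()]
--     l.reverse()
--     version = sum(x * (100 ** i) for i, x in enumerate(l))
--     return version
-- ===== SOURCE B (Python) =====
-- def transform(version: str) -> int:
--     version += {0: '.0.0', 1: '.0'}.get(version.count('.'), '')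
--     acc = 0
--     for part in version.split('.'):
--         if part.isnumeric():
--             acc = acc * 100 + int(part, 10)
--     return acc
-- ===== Notes on version B (the rewrite author's own statement) =====
-- stated objective: simpler
-- what changed: Replaces A's if/elif string padding plus filtered-list build, reverse, enumerate and explicit 100**i powers with a dict-lookup pad suffix and a single left-to-right Horner accumulation (acc = acc*100 + int(part,10)).
import Mathlib
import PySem

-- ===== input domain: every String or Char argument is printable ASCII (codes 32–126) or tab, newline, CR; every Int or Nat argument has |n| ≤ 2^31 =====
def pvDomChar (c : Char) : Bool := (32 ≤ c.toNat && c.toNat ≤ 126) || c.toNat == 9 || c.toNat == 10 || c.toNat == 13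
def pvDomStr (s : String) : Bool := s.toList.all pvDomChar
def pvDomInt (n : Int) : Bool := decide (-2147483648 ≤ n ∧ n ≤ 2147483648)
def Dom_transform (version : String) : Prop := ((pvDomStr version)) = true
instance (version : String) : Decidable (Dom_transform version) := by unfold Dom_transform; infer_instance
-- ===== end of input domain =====

-- B swaps A's if/elif string padding for a dict-lookup pad suffix and replaces the
-- filtered list + reverse + enumerate/power sum with one Horner accumulation (simpler, same cost).

-- ===== PORT A =====
-- x.isnumeric() ported as strIsdigit: exact on the ASCII domain (only '0'..'9' are numeric there);
-- int(x, 10) ported as (ofStrBase? x 10).getD 0: exact here, since the filter guarantees x is a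
-- nonempty digit string so ofStrBase? never returns none.
def transform (version : String) : Int :=
  let dots := PySem.Str.count version "."
  let version1 := if dots == 1 then version ++ ".0"
                  else if dots == 0 then version ++ ".0.0" else version
  let l := ( (PySem.Str.split? version1 ".").getD []).filterMap
      (fun x => if PySem.Str.strIsdigit x then some ((PySem.Int.ofStrBase? x 10).getD 0) else none)
  let lr := l.reverse
  ((PySem.List.enumerate lr).map (fun p => p.2 * (100 ^ p.1.toNat))).sum

-- ===== PORT B =====
-- the literal dict {0: '.0.0', 1: '.0'} of Source B
def pvPad : PySem.Dict Int String := PySem.Dict.ofList [(0, ".0.0"), (1, ".0")]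

-- the for-loop of Source B as structural recursion on the parts, carrying acc
def pvHorner : List String → Int → Int
  | [], acc => acc
  | part :: rest, acc =>
      pvHorner rest
        (if PySem.Str.strIsdigit part then acc * 100 + (PySem.Int.ofStrBase? part 10).getD 0
         else acc)

def transform_alt (version : String) : Int :=
  pvHorner
    ((PySem.Str.split?
        (version ++ pvPad.getD ((PySem.Str.count version "." : Nat) : Int) "") ".").getD [])
    0

-- ===== PRECONDITION & SPEC =====
def Spec_transform (version : String) (out : Int) : Prop := out = transform_alt version
instance (version : String) (out : Int) : Decidable (Spec_transform version out) := by unfold Spec_transform; infer_instance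

-- ===== CLAIM (what is proved, stated in full; the proofs are below) =====
def Claim_equal_transform : Prop := ∀ (version : String), Dom_transform version → Spec_transform version (transform version)

-- ===== LEMMAS AND PROOFS =====

-- A's padded string equals B's padded string, by cases on the dot count
theorem pad_eq (version : String) :
    (if PySem.Str.count version "." == 1 then version ++ ".0"
     else if PySem.Str.count version "." == 0 then version ++ ".0.0" else version)
      = version ++ pvPad.getD ((PySem.Str.count version "." : Nat) : Int) "" := by
  rcases hc : PySem.Str.count version "." with _ | _ | n
  · simp [pvPad, PySem.Dict.ofList, PySem.Dict.getD, PySem.Dict.get?,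
      PySem.Dict.update, PySem.Dict.empty, PySem.Dict.insert]
  · simp [pvPad, PySem.Dict.ofList, PySem.Dict.getD, PySem.Dict.get?,
      PySem.Dict.update, PySem.Dict.empty, PySem.Dict.insert, List.find?]
  · have h0 : ((0:Int) == (n : Int) + 1 + 1) = false := by simp; omega
    have h1 : ((1:Int) == (n : Int) + 1 + 1) = false := by simp; omega
    simp [pvPad, PySem.Dict.ofList, PySem.Dict.getD, PySem.Dict.get?,
      PySem.Dict.update, PySem.Dict.empty, PySem.Dict.insert, List.find?, h0, h1]

-- B's Horner recursion over the raw parts equals the Horner fold over A's filtered list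
theorem pvHorner_eq_filterMap :
    ∀ (parts : List String) (a : Int),
      pvHorner parts a
        = (parts.filterMap
            (fun x => if PySem.Str.strIsdigit x then some ((PySem.Int.ofStrBase? x 10).getD 0) else none)).foldl
            (fun acc v => acc * 100 + v) a := by
  intro parts
  induction parts with
  | nil => intro a; rfl
  | cons x t ih =>
      intro a
      by_cases hx : PySem.Chars.strIsdigit x.toList = true <;>
        simp [pvHorner, PySem.Str.strIsdigit, hx, ih]

-- recursive form of A's positional sum (weight 100^i from the front of the reversed list)
def hsum : List Int → Int
  | [] => 0
  | x :: t => x + 100 * hsum t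

theorem enum_sum_eq_hsum : ∀ (l : List Int) (s : Nat),
    ((PySem.List.enumerate l (s : Int)).map (fun p => p.2 * (100 ^ p.1.toNat))).sum
      = 100 ^ s * hsum l := by
  intro l
  induction l with
  | nil => intro s; simp [PySem.List.enumerate_nil, hsum]
  | cons x t ih =>
      intro s
      have h1 : ((s : Int) + 1) = ((s + 1 : Nat) : Int) := by push_cast; ring
      rw [PySem.List.enumerate_cons, List.map_cons, List.sum_cons, h1, ih (s + 1)]
      simp [hsum, Int.toNat_natCast]
      ring

theorem horner_eq_hsum_reverse : ∀ (l : List Int) (a : Int),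
    l.foldl (fun acc v => acc * 100 + v) a = a * 100 ^ l.length + hsum l.reverse := by
  intro l
  induction l using List.reverseRecOn with
  | nil => intro a; simp [hsum]
  | append_singleton t x ih =>
      intro a
      rw [List.foldl_append]
      simp only [List.foldl, ih, List.reverse_append, List.reverse_singleton,
        List.singleton_append, hsum, List.length_append, List.length_singleton]
      ring

theorem enum_sum_eq_hsum0 (l : List Int) :
    ((PySem.List.enumerate l 0).map (fun p => p.2 * (100 ^ p.1.toNat))).sum = hsum l := by
  have h := enum_sum_eq_hsum l 0
  simpa using h

-- ===== VERDICT (by name: the statement is the Claim_ definition above) =====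
theorem transform_spec : Claim_equal_transform := by
  intro version _
  unfold Spec_transform transform transform_alt
  rw [← pad_eq]
  simp only [pvHorner_eq_filterMap, enum_sum_eq_hsum0, horner_eq_hsum_reverse]
  ring
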